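-- pv_equiv track=rewrite | github.com/hemalathanaredlaMAHI/CP-elective-4 | 05-nth_lychrelnumber-Python/nthlychrelnumber.py | nthlychrelnumbers
-- ===== SOURCE A (Python) =====
-- def revers(n):
-- 	s=0
-- 	while(n>0):
-- 		r=n%10
-- 		s=s*10+r
-- 		n=n//10
-- 	return s
--
-- def ispallindrom(n):
-- 	if(revers(n)==n):
-- 		return True
-- 	return False
--
-- def islychrelnumber(n):
-- 	for i in range(0,50):
-- 		n+=revers(n)
-- 		if ispallindrom(n):
-- 			return False
-- 	return True
--
-- def nthlychrelnumbers(n):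
-- 	# your code goes here
-- 	c=0
-- 	i=1
-- 	while(c!=n):
-- 		if(islychrelnumber(i)):
-- 			c+=1
-- 		i+=1
-- 	return i-1
-- ===== SOURCE B (Python) =====
-- # Digit-vector reverse-add: each candidate is converted to its base-10 digit
-- # list once, the 50 reverse-add rounds run on digit lists with explicit carry
-- # propagation, and the palindrome test is plain list symmetry.
-- def _digits(m):
--     ds = []
--     while m > 0:
--         ds.append(m % 10)
--         m //= 10
--     return ds
--
-- def _add_rev(ds):
--     out = []
--     carry = 0
--     for a, b in zip(ds, reversed(ds)):
--         s = a + b + carry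
--         out.append(s % 10)
--         carry = s // 10
--     if carry != 0:
--         out.append(carry)
--     return out
--
-- def _is_lychrel(m):
--     ds = _digits(m)
--     for _ in range(50):
--         ds = _add_rev(ds)
--         if ds == list(reversed(ds)):
--             return False
--     return True
--
-- def nthlychrelnumbers(n):
--     c = 0
--     i = 0
--     while c < n:
--         i += 1
--         if _is_lychrel(i):
--             c += 1
--     return i
-- ===== Notes on version B (the rewrite author's own statement) =====
-- stated objective: alternative
-- what changed: B runs the fixed-round reverse-add Lychrel test on base-10 digit lists (explicit carry-propagating addition of a digit list with its reversal, palindrome = list symmetry) instead of A's per-round integer modulo/floor-divide reversal loops, and restructures the outer search as increment-then-test.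
import Mathlib
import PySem

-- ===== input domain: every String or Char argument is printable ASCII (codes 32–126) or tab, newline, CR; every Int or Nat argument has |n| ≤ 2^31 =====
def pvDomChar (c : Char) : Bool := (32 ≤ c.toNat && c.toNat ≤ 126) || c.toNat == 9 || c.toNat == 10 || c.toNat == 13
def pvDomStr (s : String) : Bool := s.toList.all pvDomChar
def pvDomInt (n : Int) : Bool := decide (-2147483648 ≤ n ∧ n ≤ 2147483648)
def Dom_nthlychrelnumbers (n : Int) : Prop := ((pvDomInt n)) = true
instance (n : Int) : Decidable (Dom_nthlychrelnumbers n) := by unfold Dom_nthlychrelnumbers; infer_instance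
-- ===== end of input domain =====

-- B replaces A's per-round integer modulo/divide digit-reversal loops by reverse-add on
-- base-10 digit lists with explicit carries (alternative representation, not claimed faster).
-- Both unbounded outer while-loops are totalized with the same large fuel bound; the
-- equivalence theorem holds for every fuel, and Pre_ excludes negative n, where Python A diverges.

-- ===== PORT A =====
-- 'def revers(n): s=0; while n>0: r=n%10; s=s*10+r; n=n//10; return s'
def reversA (n s : Int) : Int :=
  if h : 0 < n then reversA (PySem.Int.floordiv n 10) (s * 10 + PySem.Int.mod n 10) else s
termination_by n.toNat
decreasing_by
  have h1 : PySem.Int.floordiv n 10 < n := by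
    rw [PySem.Int.floordiv_lt_iff_lt_mul (by omega)]; omega
  omega

def ispallindromA (n : Int) : Bool :=
  if reversA n 0 = n then true else false

-- 'for i in range(0,50): n+=revers(n); if ispallindrom(n): return False / return True'
def islychrelA (n : Int) : Nat → Bool
  | 0 => true
  | Nat.succ k =>
      let n' := n + reversA n 0
      if ispallindromA n' then false else islychrelA n' k

-- 'while c!=n: if islychrelnumber(i): c+=1; i+=1 / return i-1' (fuel-totalized)
def loopA (fuel : Nat) (c i n : Int) : Int :=
  match fuel with
  | 0 => i - 1
  | Nat.succ f => if c ≠ n then loopA f (if islychrelA i 50 then c + 1 else c) (i + 1) n else i - 1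

def nthlychrelnumbers (n : Int) : Int := loopA 1000000000000000000 0 1 n

-- ===== PORT B =====
-- '_digits: while m>0: ds.append(m%10); m//=10'
def digitsB (m : Int) : List Int :=
  if _h : 0 < m then PySem.Int.mod m 10 :: digitsB (PySem.Int.floordiv m 10) else []
termination_by m.toNat
decreasing_by
  have h1 : PySem.Int.floordiv m 10 < m := by
    rw [PySem.Int.floordiv_lt_iff_lt_mul (by omega)]; omega
  omega

-- loop body of '_add_rev': for a,b in zip(ds, reversed(ds)): s=a+b+carry; out.append(s%10); carry=s//10
def addRevStep (st : List Int × Int) (p : Int × Int) : List Int × Int :=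
  let s := p.1 + p.2 + st.2
  (st.1 ++ [PySem.Int.mod s 10], PySem.Int.floordiv s 10)

def addRevB (ds : List Int) : List Int :=
  let q := (ds.zip ds.reverse).foldl addRevStep ([], 0)
  if q.2 ≠ 0 then q.1 ++ [q.2] else q.1

-- '_is_lychrel' inner loop: ds = _add_rev(ds); if ds == list(reversed(ds)): return False
def islychrelB (ds : List Int) : Nat → Bool
  | 0 => true
  | Nat.succ k =>
      let ds' := addRevB ds
      if ds' = ds'.reverse then false else islychrelB ds' k

-- 'while c<n: i+=1; if _is_lychrel(i): c+=1 / return i' (fuel-totalized)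
def loopB (fuel : Nat) (c i n : Int) : Int :=
  match fuel with
  | 0 => i
  | Nat.succ f =>
      if c < n then
        loopB f (if islychrelB (digitsB (i + 1)) 50 then c + 1 else c) (i + 1) n
      else i

def nthlychrelnumbers_alt (n : Int) : Int := loopB 1000000000000000000 0 0 n

-- ===== PRECONDITION & SPEC =====
-- Pre_ excludes negative n: there Python A's 'while c != n' never exits (c only counts upward), so A diverges.
def Pre_nthlychrelnumbers (n : Int) : Prop := 0 ≤ n
instance (n : Int) : Decidable (Pre_nthlychrelnumbers n) := by unfold Pre_nthlychrelnumbers; infer_instance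
def pvWitness_nthlychrelnumbers : Int := 1

def Spec_nthlychrelnumbers (n : Int) (out : Int) : Prop := out = nthlychrelnumbers_alt n
instance (n : Int) (out : Int) : Decidable (Spec_nthlychrelnumbers n out) := by unfold Spec_nthlychrelnumbers; infer_instance

-- ===== CLAIM (what is proved, stated in full; the proofs are below) =====
def Claim_equal_nthlychrelnumbers : Prop := ∀ (n : Int), Dom_nthlychrelnumbers n → Pre_nthlychrelnumbers n → Spec_nthlychrelnumbers n (nthlychrelnumbers n)

-- ===== LEMMAS AND PROOFS =====

-- value of a least-significant-first digit list
def ofD : List Int → Int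
  | [] => 0
  | d :: l => d + 10 * ofD l

-- canonical digit list: all digits in [0,10), most significant digit nonzero
def CanonD (L : List Int) : Prop :=
  (∀ d ∈ L, 0 ≤ d ∧ d < 10) ∧ (∀ d, L.getLast? = some d → d ≠ 0)


-- recursive form of the '_add_rev' carry loop (proof-side helper)
def goAdd : List (Int × Int) → Int → List Int
  | [], c => if c ≠ 0 then [c] else []
  | p :: ps, c =>
      PySem.Int.mod (p.1 + p.2 + c) 10 :: goAdd ps (PySem.Int.floordiv (p.1 + p.2 + c) 10)

theorem foldl_addRevStep (p : List (Int × Int)) : ∀ (out : List Int) (c : Int),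
    (fun q : List Int × Int => if q.2 ≠ 0 then q.1 ++ [q.2] else q.1) (p.foldl addRevStep (out, c))
      = out ++ goAdd p c := by
  induction p with
  | nil => intro out c; by_cases h : c = 0 <;> simp [goAdd, h]
  | cons q ps ih =>
      intro out c
      have h := ih (out ++ [PySem.Int.mod (q.1 + q.2 + c) 10]) (PySem.Int.floordiv (q.1 + q.2 + c) 10)
      simp only [List.foldl_cons, addRevStep, goAdd]
      simpa [List.append_assoc] using h

theorem addRevB_eq (ds : List Int) : addRevB ds = goAdd (ds.zip ds.reverse) 0 := by
  have := foldl_addRevStep (ds.zip ds.reverse) [] 0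
  simpa [addRevB] using this

theorem ofD_append (l : List Int) (d : Int) : ofD (l ++ [d]) = ofD l + d * 10 ^ l.length := by
  induction l with
  | nil => simp [ofD]
  | cons x xs ih => simp [ofD, ih]; ring

theorem ofD_bounds (L : List Int) (h : ∀ d ∈ L, 0 ≤ d ∧ d < 10) :
    0 ≤ ofD L ∧ ofD L < 10 ^ L.length := by
  induction L with
  | nil => simp [ofD]
  | cons d l ih =>
      have hd := h d (by simp)
      have hl := ih (fun x hx => h x (by simp [hx]))
      have hp : (0:Int) < 10 ^ l.length := by positivity
      simp only [ofD, List.length_cons, pow_succ]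
      constructor
      · omega
      · nlinarith [hl.1, hl.2, hd.1, hd.2]

theorem canonD_tail (d : Int) (l : List Int) (h : CanonD (d :: l)) : CanonD l := by
  obtain ⟨hb, hlast⟩ := h
  refine ⟨fun x hx => hb x (by simp [hx]), fun x hx => ?_⟩
  apply hlast
  cases l with
  | nil => simp at hx
  | cons y ys => rw [List.getLast?_cons_cons]; exact hx

theorem ofD_lower (L : List Int) (h : CanonD L) (hne : L ≠ []) :
    10 ^ (L.length - 1) ≤ ofD L := by
  induction L with
  | nil => exact absurd rfl hne
  | cons d l ih =>
      obtain ⟨hb, hlast⟩ := h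
      have hd := hb d (by simp)
      cases l with
      | nil =>
          have : d ≠ 0 := hlast d (by simp)
          simp [ofD]; omega
      | cons y ys =>
          have hcl : CanonD (y :: ys) := canonD_tail d _ ⟨hb, hlast⟩
          have := ih hcl (by simp)
          have hp : (0:Int) < 10 ^ ((y :: ys).length - 1) := by positivity
          have hlen : (d :: y :: ys).length - 1 = ((y :: ys).length - 1) + 1 := by
            simp
          rw [hlen, pow_succ]
          simp only [ofD] at *
          nlinarith

theorem ofD_inj (L : List Int) : ∀ M, CanonD L → CanonD M → ofD L = ofD M → L = M := by
  induction L with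
  | nil =>
      intro M _ hM h
      cases M with
      | nil => rfl
      | cons e m =>
          exfalso
          have := ofD_lower (e :: m) hM (by simp)
          have hp : (0:Int) < 10 ^ ((e :: m).length - 1) := by positivity
          have h0 : ofD ([] : List Int) = 0 := rfl
          omega
  | cons d l ih =>
      intro M hL hM h
      cases M with
      | nil =>
          exfalso
          have := ofD_lower (d :: l) hL (by simp)
          have hp : (0:Int) < 10 ^ ((d :: l).length - 1) := by positivity
          have h0 : ofD ([] : List Int) = 0 := rfl
          omega
      | cons e m =>
          have hd := hL.1 d (by simp)
          have he := hM.1 e (by simp)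
          simp only [ofD] at h
          have hmod : d = e := by
            have h1 : (d + 10 * ofD l) % 10 = d := by
              omega
            have h2 : (e + 10 * ofD m) % 10 = e := by
              omega
            rw [h] at h1; rw [h2] at h1; exact h1.symm
          have hrest : ofD l = ofD m := by omega
          rw [hmod, ih m (canonD_tail d l hL) (canonD_tail e m hM) hrest]

theorem digitsB_spec (m : Int) (hm : 0 ≤ m) :
    CanonD (digitsB m) ∧ ofD (digitsB m) = m := by
  induction m using digitsB.induct with
  | case1 m h ih =>
      have hfd0 : (0 : Int) ≤ PySem.Int.floordiv m 10 := by
        rw [PySem.Int.le_floordiv_iff_mul_le (by omega)]; omega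
      obtain ⟨⟨hb, hlast⟩, hval⟩ := ih hfd0
      have hid := PySem.Int.floordiv_mul_add_mod m 10
      have hmn := PySem.Int.mod_nonneg m (b := 10) (by omega)
      have hml := PySem.Int.mod_lt m (b := 10) (by omega)
      rw [digitsB, dif_pos h]
      refine ⟨⟨?_, ?_⟩, ?_⟩
      · intro d hd
        rcases List.mem_cons.mp hd with rfl | hd
        · exact ⟨hmn, hml⟩
        · exact hb d hd
      · intro d hd
        cases hdig : digitsB (PySem.Int.floordiv m 10) with
        | nil =>
            rw [hdig] at hd
            simp at hd
            rw [hdig] at hval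
            have h0 : ofD ([] : List Int) = 0 := rfl
            omega
        | cons y ys =>
            rw [hdig] at hd
            rw [List.getLast?_cons_cons] at hd
            exact hlast d (by rw [hdig]; exact hd)
      · show PySem.Int.mod m 10 + 10 * ofD (digitsB (PySem.Int.floordiv m 10)) = m
        omega
  | case2 m h =>
      have hm0 : m = 0 := by omega
      rw [digitsB, dif_neg h]
      refine ⟨⟨by simp, by simp⟩, by simp [ofD, hm0]⟩

theorem digitsB_ne_nil (m : Int) (hm : 0 < m) : digitsB m ≠ [] := by
  rw [digitsB]
  simp [hm]

theorem reversA_eq (m : Int) (hm : 0 ≤ m) : ∀ s : Int,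
    reversA m s = s * 10 ^ (digitsB m).length + ofD (digitsB m).reverse := by
  induction m using digitsB.induct with
  | case1 m h ih =>
      intro s
      have hfd0 : (0 : Int) ≤ PySem.Int.floordiv m 10 := by
        rw [PySem.Int.le_floordiv_iff_mul_le (by omega)]; omega
      rw [reversA, dif_pos h, digitsB, dif_pos h]
      rw [ih hfd0]
      rw [List.reverse_cons, ofD_append]
      simp only [List.length_cons, List.length_reverse, pow_succ]
      ring
  | case2 m h =>
      intro s
      rw [reversA, dif_neg h, digitsB, dif_neg h]
      simp [ofD]

theorem goAdd_ne_nil (p : List (Int × Int)) (c : Int) (h : p ≠ []) : goAdd p c ≠ [] := by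
  cases p with
  | nil => exact absurd rfl h
  | cons q ps => simp [goAdd]

theorem carry_bound (s : Int) (h0 : 0 ≤ s) (h1 : s ≤ 19) :
    0 ≤ PySem.Int.floordiv s 10 ∧ PySem.Int.floordiv s 10 ≤ 1 ∧
      PySem.Int.floordiv s 10 * 10 + PySem.Int.mod s 10 = s ∧
      0 ≤ PySem.Int.mod s 10 ∧ PySem.Int.mod s 10 < 10 := by
  have hid := PySem.Int.floordiv_mul_add_mod s 10
  have hmn := PySem.Int.mod_nonneg s (b := 10) (by omega)
  have hml := PySem.Int.mod_lt s (b := 10) (by omega)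
  refine ⟨by omega, by omega, hid, hmn, hml⟩

theorem goAdd_ofD (p : List (Int × Int)) : ∀ c : Int,
    ofD (goAdd p c) = ofD (p.map Prod.fst) + ofD (p.map Prod.snd) + c := by
  induction p with
  | nil =>
      intro c; by_cases h : c = 0 <;> simp [goAdd, h, ofD]
  | cons q ps ih =>
      intro c
      have hid := PySem.Int.floordiv_mul_add_mod (q.1 + q.2 + c) 10
      simp only [goAdd, ofD, List.map_cons, ih]
      omega

theorem goAdd_bdd (p : List (Int × Int)) : ∀ c : Int,
    (∀ q ∈ p, (0 ≤ q.1 ∧ q.1 < 10) ∧ (0 ≤ q.2 ∧ q.2 < 10)) → 0 ≤ c → c ≤ 1 →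
    ∀ d ∈ goAdd p c, 0 ≤ d ∧ d < 10 := by
  induction p with
  | nil =>
      intro c _ hc0 hc1 d hd
      by_cases h : c = 0 <;> simp [goAdd, h] at hd
      · omega
  | cons q ps ih =>
      intro c hb hc0 hc1 d hd
      have hq := hb q (by simp)
      have hs0 : 0 ≤ q.1 + q.2 + c := by omega
      have hs1 : q.1 + q.2 + c ≤ 19 := by omega
      have hcb := carry_bound (q.1 + q.2 + c) hs0 hs1
      simp only [goAdd, List.mem_cons] at hd
      rcases hd with rfl | hd
      · exact ⟨hcb.2.2.2.1, hcb.2.2.2.2⟩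
      · exact ih _ (fun x hx => hb x (by simp [hx])) hcb.1 hcb.2.1 d hd

theorem goAdd_last (p : List (Int × Int)) : ∀ c : Int,
    (∀ q ∈ p, (0 ≤ q.1 ∧ q.1 < 10) ∧ (0 ≤ q.2 ∧ q.2 < 10)) → 0 ≤ c → c ≤ 1 →
    (∀ q, p.getLast? = some q → 1 ≤ q.1) → p ≠ [] →
    ∀ d, (goAdd p c).getLast? = some d → d ≠ 0 := by
  induction p with
  | nil => intro c _ _ _ _ hne; exact absurd rfl hne
  | cons q ps ih =>
      intro c hb hc0 hc1 hlast _ d hd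
      have hq := hb q (by simp)
      have hcb := carry_bound (q.1 + q.2 + c) (by omega) (by omega)
      cases hps : ps with
      | nil =>
          subst hps
          have ha : 1 ≤ q.1 := hlast q (by simp)
          simp only [goAdd] at hd
          by_cases hcz : PySem.Int.floordiv (q.1 + q.2 + c) 10 = 0
          · rw [hcz] at hd
            norm_num at hd
            omega
          · rw [if_pos hcz] at hd
            rw [List.getLast?_cons_cons] at hd
            simp at hd
            omega
      | cons r rs =>
          subst hps
          simp only [goAdd] at hd
          rw [List.getLast?_cons_cons] at hd
          exact ih _ (fun x hx => hb x (by simp [hx])) hcb.1 hcb.2.1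
            (fun x hx => hlast x (by rw [List.getLast?_cons_cons]; exact hx)) (by simp) d hd

theorem addRevB_spec (ds : List Int) (h : CanonD ds) (hne : ds ≠ []) :
    CanonD (addRevB ds) ∧ addRevB ds ≠ [] ∧ ofD (addRevB ds) = ofD ds + ofD ds.reverse := by
  have hlen : ds.length ≤ ds.reverse.length := by simp
  have hfst : (ds.zip ds.reverse).map Prod.fst = ds := List.map_fst_zip hlen
  have hsnd : (ds.zip ds.reverse).map Prod.snd = ds.reverse := List.map_snd_zip (by simp)
  have hzb : ∀ q ∈ ds.zip ds.reverse, (0 ≤ q.1 ∧ q.1 < 10) ∧ (0 ≤ q.2 ∧ q.2 < 10) := by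
    intro q hq
    obtain ⟨h1, h2⟩ := List.of_mem_zip hq
    exact ⟨h.1 q.1 h1, h.1 q.2 (List.mem_reverse.mp h2)⟩
  have hzne : ds.zip ds.reverse ≠ [] := by
    cases ds with
    | nil => exact absurd rfl hne
    | cons x xs => simp [List.zip]
  have hzlast : ∀ q, (ds.zip ds.reverse).getLast? = some q → 1 ≤ q.1 := by
    intro q hq
    have : ds.getLast? = some q.1 := by
      rw [← hfst, List.getLast?_map, hq]; rfl
    have hne0 := h.2 q.1 this
    have hmem : q.1 ∈ ds := List.mem_of_getLast? this
    have := h.1 q.1 hmem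
    omega
  rw [addRevB_eq]
  refine ⟨⟨goAdd_bdd _ 0 hzb (by omega) (by omega), goAdd_last _ 0 hzb (by omega) (by omega) hzlast hzne⟩,
    goAdd_ne_nil _ 0 hzne, ?_⟩
  rw [goAdd_ofD, hfst, hsnd]
  omega

theorem palindrome_iff (L : List Int) (h : CanonD L) :
    (ofD L.reverse = ofD L) ↔ L.reverse = L := by
  constructor
  · intro heq
    cases L with
    | nil => rfl
    | cons d t =>
        have hd := h.1 d (by simp)
        by_cases hd0 : d = 0
        · exfalso
          subst hd0
          have hrev : (0 :: t).reverse = t.reverse ++ [0] := by simp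
          have hv : ofD ((0 :: t).reverse) = ofD t.reverse := by
            rw [hrev, ofD_append]; ring
          have htb : ∀ x ∈ t.reverse, 0 ≤ x ∧ x < 10 := by
            intro x hx
            exact h.1 x (by simp [List.mem_reverse.mp hx])
          have hub := (ofD_bounds t.reverse htb).2
          have hlb := ofD_lower (0 :: t) h (by simp)
          have hlen : (0 :: t).length - 1 = t.reverse.length := by simp
          rw [hlen] at hlb
          omega
        · have hcrev : CanonD ((d :: t).reverse) := by
            refine ⟨fun x hx => h.1 x (List.mem_reverse.mp hx), fun x hx => ?_⟩
            rw [List.getLast?_reverse] at hx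
            simp at hx
            omega
          exact ofD_inj _ _ hcrev h heq
  · intro heq; rw [heq]

theorem isly_eq : ∀ (k : Nat) (m : Int) (ds : List Int), 1 ≤ m → CanonD ds → ds ≠ [] →
    ofD ds = m → islychrelA m k = islychrelB ds k := by
  intro k
  induction k with
  | zero => intros; rfl
  | succ k ih =>
      intro m ds hm hc hne hofd
      have hds : digitsB m = ds := by
        obtain ⟨hcm, hvm⟩ := digitsB_spec m (by omega)
        exact ofD_inj _ ds hcm hc (by rw [hvm, hofd])
      have hrev : reversA m 0 = ofD ds.reverse := by
        rw [reversA_eq m (by omega) 0, hds]; ring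
      obtain ⟨hc', hne', hv'⟩ := addRevB_spec ds hc hne
      have hrevnn : 0 ≤ ofD ds.reverse :=
        (ofD_bounds ds.reverse (fun x hx => hc.1 x (List.mem_reverse.mp hx))).1
      have hm' : m + reversA m 0 = ofD (addRevB ds) := by rw [hrev, hv', hofd]
      have hlow := ofD_lower (addRevB ds) hc' hne'
      have hp10 : (0:Int) < 10 ^ ((addRevB ds).length - 1) := by positivity
      have hm'pos : 1 ≤ m + reversA m 0 := by omega
      have hds' : digitsB (m + reversA m 0) = addRevB ds := by
        obtain ⟨hcm', hvm'⟩ := digitsB_spec _ (by omega : (0:Int) ≤ m + reversA m 0)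
        exact ofD_inj _ _ hcm' hc' (by rw [hvm', hm'])
      have hiff : (reversA (m + reversA m 0) 0 = m + reversA m 0) ↔
          (addRevB ds = (addRevB ds).reverse) := by
        rw [reversA_eq (m + reversA m 0) (by omega) 0, hds', hm']
        simp only [zero_mul, zero_add]
        rw [palindrome_iff _ hc']
        exact eq_comm
      have hbool : ispallindromA (m + reversA m 0) =
          decide (addRevB ds = (addRevB ds).reverse) := by
        unfold ispallindromA
        by_cases hp : addRevB ds = (addRevB ds).reverse
        · rw [if_pos (hiff.mpr hp)]; exact (decide_eq_true hp).symm
        · rw [if_neg (fun hh => hp (hiff.mp hh))]; exact (decide_eq_false hp).symm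
      simp only [islychrelA, islychrelB]
      rw [hbool]
      by_cases hp : addRevB ds = (addRevB ds).reverse
      · rw [decide_eq_true hp, if_pos hp]
        simp
      · rw [decide_eq_false hp, if_neg hp]
        simpa using ih (m + reversA m 0) (addRevB ds) hm'pos hc' hne' hm'.symm

theorem loop_eq : ∀ (f : Nat) (c i n : Int), c ≤ n → 1 ≤ i →
    loopA f c i n = loopB f c (i - 1) n := by
  intro f
  induction f with
  | zero => intro c i n _ _; rfl
  | succ f ih =>
      intro c i n hcn hi
      by_cases hc : c = n
      · subst hc
        simp only [loopA, loopB]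
        rw [if_neg (by omega : ¬ c ≠ c), if_neg (by omega : ¬ c < c)]
      · have hlt : c < n := lt_of_le_of_ne hcn hc
        simp only [loopA, loopB]
        rw [if_pos hc, if_pos hlt]
        have h1 : i - 1 + 1 = i := by omega
        rw [h1]
        have hdig := digitsB_spec i (by omega)
        have hisly := isly_eq 50 i (digitsB i) hi hdig.1 (digitsB_ne_nil i (by omega)) hdig.2
        rw [← hisly]
        have hc' : (if islychrelA i 50 then c + 1 else c) ≤ n := by
          by_cases hh : islychrelA i 50 <;> simp [hh] <;> omega
        have h2 := ih (if islychrelA i 50 then c + 1 else c) (i + 1) n hc' (by omega)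
        have h3 : i + 1 - 1 = i := by omega
        rwa [h3] at h2

-- ===== VERDICT (by name: the statement is the Claim_ definition above) =====
theorem nthlychrelnumbers_spec : Claim_equal_nthlychrelnumbers := by
  intro n _ hn
  unfold Spec_nthlychrelnumbers nthlychrelnumbers nthlychrelnumbers_alt
  have := loop_eq 1000000000000000000 0 1 n hn (by omega)
  simpa using this
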